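-- pv_equiv track=rewrite | github.com/YangZhi1605/reCode_demo_python | BackSupport/BackSupport/utils/wrben2_utils.py | count_diff_voltages_single
-- ===== SOURCE A (Python) =====
-- def count_diff_voltages_single(diff_voltage):
--     """
--
--     Args:
--         diff_voltage: 单列电压差值列表
--
--     Returns:
--         count_diff_single:本列的各个阶段数据统计
--
--     """
--     # 结果字典
--     count_diff_single = {
--         '0-50': 0,
--         '50-150': 0,
--         '150-200': 0,
--         '200-300': 0,
--         '300-500': 0
--     }
--     # 遍历每行数据，统计每行数据的差值在不同区间的个数
--     for diff in diff_voltage: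
--         if 0 <= diff <= 50:
--             count_diff_single['0-50'] += 1
--         elif 50 < diff <= 150:
--             count_diff_single['50-150'] += 1
--         elif 150 < diff <= 200:
--             count_diff_single['150-200'] += 1
--         elif 200 < diff <= 300:
--             count_diff_single['200-300'] += 1
--         elif 300 < diff <= 500:
--             count_diff_single['300-500'] += 1
--     # 返回统计结果
--     return count_diff_single
-- ===== SOURCE B (Python) =====
-- def _bisect_left(a, x):
--     lo, hi = 0, len(a)
--     while lo < hi:
--         mid = (lo + hi) // 2
--         if a[mid] < x:
--             lo = mid + 1
--         else:
--             hi = mid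
--     return lo
--
--
-- def count_diff_voltages_single(diff_voltage):
--     keys = ['0-50', '50-150', '150-200', '200-300', '300-500']
--     bounds = [50, 150, 200, 300, 500]
--     counts = [0, 0, 0, 0, 0]
--     for diff in diff_voltage:
--         if 0 <= diff <= 500:
--             counts[_bisect_left(bounds, diff)] += 1
--     return dict(zip(keys, counts))
-- ===== Notes on version B (the rewrite author's own statement) =====
-- stated objective: alternative
-- what changed: Replaces the five-way if/elif chained-comparison ladder with per-key dict increments by a boundary table consulted via a hand-written binary search that yields a bucket index into a plain counts array, zipped with the key names once at the end.
import Mathlib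
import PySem

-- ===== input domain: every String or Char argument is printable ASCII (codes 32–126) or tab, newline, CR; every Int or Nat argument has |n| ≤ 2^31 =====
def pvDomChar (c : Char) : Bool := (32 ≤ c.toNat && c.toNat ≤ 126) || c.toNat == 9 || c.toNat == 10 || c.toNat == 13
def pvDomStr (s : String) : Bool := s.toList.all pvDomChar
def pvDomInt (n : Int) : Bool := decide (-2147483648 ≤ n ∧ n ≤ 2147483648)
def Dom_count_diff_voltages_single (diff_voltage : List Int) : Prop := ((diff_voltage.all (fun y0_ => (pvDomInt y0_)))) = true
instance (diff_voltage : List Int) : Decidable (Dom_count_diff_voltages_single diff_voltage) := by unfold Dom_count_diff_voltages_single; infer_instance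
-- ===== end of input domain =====

-- B replaces A's five-way if/elif ladder over a dict with a boundary table, a
-- hand-written binary search for the bucket index and a parallel counts array
-- (objective: alternative structure, same O(n) cost).

-- ===== PORT A =====
def count_diff_voltages_single (diff_voltage : List Int) : List (String × Int) :=
  let init : PySem.Dict String Int :=
    PySem.Dict.ofList [("0-50", 0), ("50-150", 0), ("150-200", 0), ("200-300", 0), ("300-500", 0)]
  let d := diff_voltage.foldl (fun d diff =>
      -- d[k] += 1: the key is always present, so Dict.modify is exact here
      if 0 ≤ diff ∧ diff ≤ 50 then d.modify "0-50" 0 (· + 1)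
      else if 50 < diff ∧ diff ≤ 150 then d.modify "50-150" 0 (· + 1)
      else if 150 < diff ∧ diff ≤ 200 then d.modify "150-200" 0 (· + 1)
      else if 200 < diff ∧ diff ≤ 300 then d.modify "200-300" 0 (· + 1)
      else if 300 < diff ∧ diff ≤ 500 then d.modify "300-500" 0 (· + 1)
      else d) init
  d.items

-- ===== PORT B =====
-- Source B's hand-written _bisect_left, step for step (a[mid] is always in range,
-- so List.getD is exact)
def pvBisectLeftGo (a : List Int) (x : Int) (lo hi : Nat) : Nat :=
  if lo < hi then
    let mid := (lo + hi) / 2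
    if a.getD mid 0 < x then pvBisectLeftGo a x (mid + 1) hi
    else pvBisectLeftGo a x lo mid
  else lo
termination_by hi - lo
decreasing_by all_goals omega

def count_diff_voltages_single_alt (diff_voltage : List Int) : List (String × Int) :=
  let keys := ["0-50", "50-150", "150-200", "200-300", "300-500"]
  let bounds : List Int := [50, 150, 200, 300, 500]
  let counts := diff_voltage.foldl (fun cs diff =>
      if 0 ≤ diff ∧ diff ≤ 500 then
        -- counts[i] += 1 (index from the binary search, always in range)
        let i := pvBisectLeftGo bounds diff 0 bounds.length
        cs.set i (cs.getD i 0 + 1)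
      else cs) ([0, 0, 0, 0, 0] : List Int)
  keys.zip counts

-- ===== PRECONDITION & SPEC =====
def Spec_count_diff_voltages_single (diff_voltage : List Int) (out : List (String × Int)) : Prop := out = count_diff_voltages_single_alt diff_voltage
instance (diff_voltage : List Int) (out : List (String × Int)) : Decidable (Spec_count_diff_voltages_single diff_voltage out) := by unfold Spec_count_diff_voltages_single; infer_instance

-- ===== CLAIM (what is proved, stated in full; the proofs are below) =====
def Claim_equal_count_diff_voltages_single : Prop := ∀ (diff_voltage : List Int), Dom_count_diff_voltages_single diff_voltage → Spec_count_diff_voltages_single diff_voltage (count_diff_voltages_single diff_voltage)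

-- ===== LEMMAS AND PROOFS =====

-- the two loop bodies, named for the proofs (definitionally the lambdas in the ports)
def pvStepA (d : PySem.Dict String Int) (diff : Int) : PySem.Dict String Int :=
  if 0 ≤ diff ∧ diff ≤ 50 then d.modify "0-50" 0 (· + 1)
  else if 50 < diff ∧ diff ≤ 150 then d.modify "50-150" 0 (· + 1)
  else if 150 < diff ∧ diff ≤ 200 then d.modify "150-200" 0 (· + 1)
  else if 200 < diff ∧ diff ≤ 300 then d.modify "200-300" 0 (· + 1)
  else if 300 < diff ∧ diff ≤ 500 then d.modify "300-500" 0 (· + 1)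
  else d

def pvStepB (cs : List Int) (diff : Int) : List Int :=
  if 0 ≤ diff ∧ diff ≤ 500 then
    let i := pvBisectLeftGo [50, 150, 200, 300, 500] diff 0 5
    cs.set i (cs.getD i 0 + 1)
  else cs

theorem pvBis0 (x : Int) (h : x ≤ 50) : pvBisectLeftGo [50, 150, 200, 300, 500] x 0 5 = 0 := by
  simp [pvBisectLeftGo, show ¬(200 < x) by omega, show ¬(150 < x) by omega, show ¬(50 < x) by omega]

theorem pvBis1 (x : Int) (h1 : 50 < x) (h2 : x ≤ 150) :
    pvBisectLeftGo [50, 150, 200, 300, 500] x 0 5 = 1 := by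
  simp [pvBisectLeftGo, show ¬(200 < x) by omega, show ¬(150 < x) by omega, h1]

theorem pvBis2 (x : Int) (h1 : 150 < x) (h2 : x ≤ 200) :
    pvBisectLeftGo [50, 150, 200, 300, 500] x 0 5 = 2 := by
  simp [pvBisectLeftGo, show ¬(200 < x) by omega, h1]

theorem pvBis3 (x : Int) (h1 : 200 < x) (h2 : x ≤ 300) :
    pvBisectLeftGo [50, 150, 200, 300, 500] x 0 5 = 3 := by
  simp [pvBisectLeftGo, h1, show ¬(500 < x) by omega, show ¬(300 < x) by omega]

theorem pvBis4 (x : Int) (h1 : 300 < x) (h2 : x ≤ 500) :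
    pvBisectLeftGo [50, 150, 200, 300, 500] x 0 5 = 4 := by
  simp [pvBisectLeftGo, h1, show 200 < x by omega, show ¬(500 < x) by omega]

theorem pvKey :
    ∀ (xs : List Int) (a b c d e : Int),
      (xs.foldl pvStepA
        (PySem.Dict.mk [("0-50", a), ("50-150", b), ("150-200", c), ("200-300", d), ("300-500", e)])).items
      = ["0-50", "50-150", "150-200", "200-300", "300-500"].zip
          (xs.foldl pvStepB [a, b, c, d, e]) := by
  intro xs
  induction xs with
  | nil => intro a b c d e; rfl
  | cons x xs ih =>
    intro a b c d e
    rw [List.foldl_cons, List.foldl_cons]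
    by_cases h1 : 0 ≤ x ∧ x ≤ 50
    · rw [show pvStepA _ x = PySem.Dict.mk
            [("0-50", a + 1), ("50-150", b), ("150-200", c), ("200-300", d), ("300-500", e)] by
          simp [pvStepA, h1, PySem.Dict.modify, PySem.Dict.getD, PySem.Dict.get?,
            PySem.Dict.insert, PySem.Dict.contains],
        show pvStepB [a, b, c, d, e] x = [a + 1, b, c, d, e] by
          simp [pvStepB, show 0 ≤ x ∧ x ≤ 500 by omega, pvBis0 x h1.2, List.getD]]
      exact ih _ _ _ _ _
    · by_cases h2 : 50 < x ∧ x ≤ 150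
      · rw [show pvStepA _ x = PySem.Dict.mk
              [("0-50", a), ("50-150", b + 1), ("150-200", c), ("200-300", d), ("300-500", e)] by
            simp [pvStepA, h1, h2, PySem.Dict.modify, PySem.Dict.getD, PySem.Dict.get?,
              PySem.Dict.insert, PySem.Dict.contains],
          show pvStepB [a, b, c, d, e] x = [a, b + 1, c, d, e] by
            simp [pvStepB, show 0 ≤ x ∧ x ≤ 500 by omega, pvBis1 x h2.1 h2.2, List.set, List.getD]]
        exact ih _ _ _ _ _
      · by_cases h3 : 150 < x ∧ x ≤ 200
        · rw [show pvStepA _ x = PySem.Dict.mk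
                [("0-50", a), ("50-150", b), ("150-200", c + 1), ("200-300", d), ("300-500", e)] by
              simp [pvStepA, h1, h2, h3, PySem.Dict.modify, PySem.Dict.getD, PySem.Dict.get?,
                PySem.Dict.insert, PySem.Dict.contains],
            show pvStepB [a, b, c, d, e] x = [a, b, c + 1, d, e] by
              simp [pvStepB, show 0 ≤ x ∧ x ≤ 500 by omega, pvBis2 x h3.1 h3.2, List.set, List.getD]]
          exact ih _ _ _ _ _
        · by_cases h4 : 200 < x ∧ x ≤ 300
          · rw [show pvStepA _ x = PySem.Dict.mk
                  [("0-50", a), ("50-150", b), ("150-200", c), ("200-300", d + 1), ("300-500", e)] by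
                simp [pvStepA, h1, h2, h3, h4, PySem.Dict.modify, PySem.Dict.getD, PySem.Dict.get?,
                  PySem.Dict.insert, PySem.Dict.contains],
              show pvStepB [a, b, c, d, e] x = [a, b, c, d + 1, e] by
                simp [pvStepB, show 0 ≤ x ∧ x ≤ 500 by omega, pvBis3 x h4.1 h4.2, List.set, List.getD]]
            exact ih _ _ _ _ _
          · by_cases h5 : 300 < x ∧ x ≤ 500
            · rw [show pvStepA _ x = PySem.Dict.mk
                    [("0-50", a), ("50-150", b), ("150-200", c), ("200-300", d), ("300-500", e + 1)] by
                  simp [pvStepA, h1, h2, h3, h4, h5, PySem.Dict.modify, PySem.Dict.getD,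
                    PySem.Dict.get?, PySem.Dict.insert, PySem.Dict.contains],
                show pvStepB [a, b, c, d, e] x = [a, b, c, d, e + 1] by
                  simp [pvStepB, show 0 ≤ x ∧ x ≤ 500 by omega, pvBis4 x h5.1 h5.2, List.set,
                    List.getD]]
              exact ih _ _ _ _ _
            · rw [show pvStepA _ x = PySem.Dict.mk
                    [("0-50", a), ("50-150", b), ("150-200", c), ("200-300", d), ("300-500", e)] by
                  simp [pvStepA, h1, h2, h3, h4, h5],
                show pvStepB [a, b, c, d, e] x = [a, b, c, d, e] by
                  simp only [pvStepB, if_neg (show ¬(0 ≤ x ∧ x ≤ 500) by omega)]]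
              exact ih _ _ _ _ _

-- ===== VERDICT (by name: the statement is the Claim_ definition above) =====
theorem count_diff_voltages_single_spec : Claim_equal_count_diff_voltages_single := by
  intro xs _
  show (List.foldl pvStepA
      (PySem.Dict.ofList [("0-50", 0), ("50-150", 0), ("150-200", 0), ("200-300", 0), ("300-500", 0)]) xs).items
    = ["0-50", "50-150", "150-200", "200-300", "300-500"].zip (List.foldl pvStepB [0, 0, 0, 0, 0] xs)
  rw [show (PySem.Dict.ofList [("0-50", (0:Int)), ("50-150", 0), ("150-200", 0), ("200-300", 0), ("300-500", 0)] : PySem.Dict String Int)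
      = PySem.Dict.mk [("0-50", 0), ("50-150", 0), ("150-200", 0), ("200-300", 0), ("300-500", 0)] from by decide]
  exact pvKey xs 0 0 0 0 0
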